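-- pv_equiv track=rewrite | github.com/songjung-good/algorithm | 프로그래머스/0/181932. 코드 처리하기/코드 처리하기.py | solution
-- ===== SOURCE A (Python) =====
-- def solution(code):
--     answer = ''
--     mode = 0
--     num = 0
--
--     for idx in code:
--         if mode == 0:
--             if idx == '1':
--                 mode = 1
--             else:
--                 if num % 2 == 0:
--                     answer += idx
--         else:
--             if idx == '1':
--                 mode = 0
--             else:
--                 if num % 2 == 1:
--                     answer += idx
--         num += 1
--
--     if answer == '':
--         answer = "EMPTY"
--
--     return answer
-- ===== SOURCE B (Python) =====
-- def solution(code):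
--     # Phase 1: prefix table pre[i] = number of '1' chars in code[:i].
--     pre = [0]
--     for c in code:
--         pre.append(pre[-1] + (c == '1'))
--     # Phase 2: keep each non-'1' char whose index parity matches the mode there.
--     kept = ''.join(c for i, c in enumerate(code)
--                    if c != '1' and pre[i] % 2 == i % 2)
--     return kept or "EMPTY"
-- ===== Notes on version B (the rewrite author's own statement) =====
-- stated objective: alternative
-- what changed: Replaces A's single-pass running state machine (mode flag toggled by '1', index counter, incremental string accumulation) by a two-phase table-then-scan: first build a prefix table of '1'-counts, then a filtering comprehension keeps each non-'1' char whose index parity matches the table's parity at its position.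
import Mathlib
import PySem

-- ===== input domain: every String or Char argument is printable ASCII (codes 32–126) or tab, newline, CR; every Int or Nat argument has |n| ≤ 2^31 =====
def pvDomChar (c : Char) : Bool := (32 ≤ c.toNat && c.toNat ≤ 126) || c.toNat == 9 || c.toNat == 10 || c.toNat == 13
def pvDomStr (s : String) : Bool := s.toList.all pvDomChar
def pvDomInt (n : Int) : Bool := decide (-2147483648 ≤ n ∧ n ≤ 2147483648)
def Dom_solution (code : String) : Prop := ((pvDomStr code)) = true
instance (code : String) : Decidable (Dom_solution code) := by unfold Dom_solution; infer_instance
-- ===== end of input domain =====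

-- B rebuilds A's inline mode/index state machine as a prefix-count table plus a filtering scan; same values, alternative structure.

-- ===== PORT A =====
-- one loop iteration of A: state (answer, mode, num)
def solutionStep (s : List Char × Nat × Nat) (c : Char) : List Char × Nat × Nat :=
  if s.2.1 = 0 then
    if c = '1' then (s.1, 1, s.2.2 + 1)
    else if s.2.2 % 2 = 0 then (s.1 ++ [c], s.2.1, s.2.2 + 1) else (s.1, s.2.1, s.2.2 + 1)
  else
    if c = '1' then (s.1, 0, s.2.2 + 1)
    else if s.2.2 % 2 = 1 then (s.1 ++ [c], s.2.1, s.2.2 + 1) else (s.1, s.2.1, s.2.2 + 1)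

def solution (code : String) : String :=
  let r := code.toList.foldl solutionStep ([], 0, 0)
  if r.1 = [] then "EMPTY" else String.ofList r.1

-- ===== PORT B =====
def solution_alt (code : String) : String :=
  let cs := code.toList
  -- phase 1: pre[i] = number of '1' chars among cs[0:i]  (pre = [0]; pre.append(pre[-1] + (c=='1')))
  let pre : List Int := cs.foldl (fun p c => p ++ [p.getLastD 0 + (if c = '1' then 1 else 0)]) [0]
  -- phase 2: keep c at index i iff c != '1' and pre[i] % 2 == i % 2
  let kept := ((PySem.List.enumerate cs).filter
      (fun ic => decide (ic.2 ≠ '1' ∧ PySem.Int.mod (PySem.List.pyGetD pre ic.1 0) 2 = PySem.Int.mod ic.1 2))).map (·.2)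
  if kept = [] then "EMPTY" else String.ofList kept

-- ===== PRECONDITION & SPEC =====
def Spec_solution (code : String) (out : String) : Prop := out = solution_alt code
instance (code : String) (out : String) : Decidable (Spec_solution code out) := by unfold Spec_solution; infer_instance

-- ===== CLAIM (what is proved, stated in full; the proofs are below) =====
def Claim_equal_solution : Prop := ∀ (code : String), Dom_solution code → Spec_solution code (solution code)

-- ===== LEMMAS AND PROOFS =====

-- common characterisation: surviving chars of l, starting at global index n with o '1's seen before
def keepChars (l : List Char) (n o : Nat) : List Char :=
  match l with
  | [] => []
  | c :: l =>
    if c = '1' then keepChars l (n + 1) (o + 1)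
    else if o % 2 = n % 2 then c :: keepChars l (n + 1) o else keepChars l (n + 1) o

-- A-side: the fold's answer extends ans by the characterisation
theorem foldA_eq_keep (l : List Char) (ans : List Char) (n o : Nat) :
    (l.foldl solutionStep (ans, o % 2, n)).1 = ans ++ keepChars l n o := by
  induction l generalizing ans n o with
  | nil => simp [keepChars]
  | cons c l ih =>
    have h2 : o % 2 = 0 ∨ o % 2 = 1 := Nat.mod_two_eq_zero_or_one o
    rcases h2 with h2 | h2
    · have h2' : (o + 1) % 2 = 1 := by omega
      by_cases hc : c = '1'
      · have := ih ans (n + 1) (o + 1)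
        rw [h2'] at this
        simp [solutionStep, keepChars, h2, hc, this]
      · by_cases hn : n % 2 = 0
        · have := ih (ans ++ [c]) (n + 1) o
          rw [h2] at this
          simp [solutionStep, keepChars, h2, hc, hn, this]
        · have := ih ans (n + 1) o
          rw [h2] at this
          simp [solutionStep, keepChars, h2, hc, hn, this]
          omega
    · have h2' : (o + 1) % 2 = 0 := by omega
      by_cases hc : c = '1'
      · have := ih ans (n + 1) (o + 1)
        rw [h2'] at this
        simp [solutionStep, keepChars, h2, hc, this]
      · by_cases hn : n % 2 = 1
        · have := ih (ans ++ [c]) (n + 1) o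
          rw [h2] at this
          simp [solutionStep, keepChars, h2, hc, hn, this]
        · have := ih ans (n + 1) o
          rw [h2] at this
          simp [solutionStep, keepChars, h2, hc, hn, this]
          omega

-- B-side phase 1: the values appended by the fold
def preL (o : Int) : List Char → List Int
  | [] => []
  | c :: l => (o + (if c = '1' then 1 else 0)) :: preL (o + (if c = '1' then 1 else 0)) l

theorem foldPre_eq (l : List Char) (p : List Int) :
    l.foldl (fun p c => p ++ [p.getLastD 0 + (if c = '1' then 1 else 0)]) p
      = p ++ preL (p.getLastD 0) l := by
  induction l generalizing p with
  | nil => simp [preL]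
  | cons c l ih =>
    rw [List.foldl_cons, ih, List.getLastD_concat]
    simp [preL]

theorem pre_getD (l : List Char) (o : Int) (j : Nat) :
    (o :: preL o l).getD j 0 = o + ((l.take j).countP (· = '1') : Int) ∨ l.length < j := by
  induction l generalizing o j with
  | nil =>
    cases j with
    | zero => left; simp
    | succ j => right; simp
  | cons c l ih =>
    cases j with
    | zero => left; simp
    | succ j =>
      rcases ih (o + (if c = '1' then 1 else 0)) j with h | h
      · left
        rw [List.getD_cons_succ,
          show preL o (c :: l) = (o + (if c = '1' then 1 else 0)) :: preL (o + (if c = '1' then 1 else 0)) l from rfl,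
          h]
        by_cases hc : c = '1'
        · simp [hc]; ring
        · simp [hc]
      · right; simp only [List.length_cons]; omega

-- B-side phase 2: the filter over enumerate is the characterisation, given a correct table
theorem filter_eq_keep (l : List Char) (pre : List Int) (n o : Nat)
    (H : ∀ j : Nat, j < l.length →
      PySem.List.pyGetD pre ((n + j : Nat) : Int) 0 = (o : Int) + ((l.take j).countP (· = '1') : Int)) :
    ((PySem.List.enumerate l ((n : Nat) : Int)).filter
        (fun ic => decide (ic.2 ≠ '1' ∧ PySem.Int.mod (PySem.List.pyGetD pre ic.1 0) 2 = PySem.Int.mod ic.1 2))).map (·.2)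
      = keepChars l n o := by
  induction l generalizing n o with
  | nil => simp [PySem.List.enumerate, keepChars]
  | cons c l ih =>
    have h0 : PySem.List.pyGetD pre ((n : Nat) : Int) 0 = (o : Int) := by
      have := H 0 (by simp)
      simpa using this
    have hstep : ((n : Nat) : Int) + 1 = (((n + 1 : Nat)) : Int) := by push_cast; ring
    rw [PySem.List.enumerate_cons, hstep]
    by_cases hc : c = '1'
    · have ih' := ih (n + 1) (o + 1) (fun j hj => by
        have := H (j + 1) (by simp only [List.length_cons]; omega)
        simp only [List.take, List.countP_cons, hc] at this ⊢
        rw [show ((n + (j + 1) : Nat) : Int) = ((n + 1 + j : Nat) : Int) by push_cast; ring] at this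
        rw [this]; simp; ring)
      rw [List.filter_cons]
      simp only [hc, ne_eq, not_true_eq_false, false_and, decide_false, Bool.false_eq_true,
        if_false]
      rw [ih']
      simp [keepChars]
    · have ih' := ih (n + 1) o (fun j hj => by
        have := H (j + 1) (by simp only [List.length_cons]; omega)
        simp only [List.take, List.countP_cons, hc] at this ⊢
        rw [show ((n + (j + 1) : Nat) : Int) = ((n + 1 + j : Nat) : Int) by push_cast; ring] at this
        rw [this]; simp)
      rw [List.filter_cons]
      have hcond : (decide (c ≠ '1' ∧ PySem.Int.mod (PySem.List.pyGetD pre ((n : Nat) : Int) 0) 2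
          = PySem.Int.mod ((n : Nat) : Int) 2)) = decide (o % 2 = n % 2) := by
        simp [hc, h0]
        omega
      rw [hcond]
      by_cases hmn : o % 2 = n % 2
      · simp only [hmn, decide_true, if_true, List.map_cons]
        rw [ih']
        simp [keepChars, hc, hmn]
      · simp only [hmn, decide_false, Bool.false_eq_true, if_false]
        rw [ih']
        simp [keepChars, hc, hmn]

-- ===== VERDICT (by name: the statement is the Claim_ definition above) =====
theorem solution_spec : Claim_equal_solution := by
  intro code _
  unfold Spec_solution solution solution_alt
  dsimp only
  have hA : (code.toList.foldl solutionStep ([], 0, 0)).1 = keepChars code.toList 0 0 := by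
    have := foldA_eq_keep code.toList [] 0 0
    simpa using this
  have hpre : code.toList.foldl (fun p c => p ++ [p.getLastD 0 + (if c = '1' then 1 else 0)]) [0]
      = (0 : Int) :: preL 0 code.toList := by
    rw [foldPre_eq]; simp
  have hB : ((PySem.List.enumerate code.toList ((0 : Nat) : Int)).filter
      (fun ic => decide (ic.2 ≠ '1' ∧ PySem.Int.mod (PySem.List.pyGetD
        (code.toList.foldl (fun p c => p ++ [p.getLastD 0 + (if c = '1' then 1 else 0)]) [0]) ic.1 0) 2
        = PySem.Int.mod ic.1 2))).map (·.2) = keepChars code.toList 0 0 := by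
    rw [hpre]
    apply filter_eq_keep
    intro j hj
    have := pre_getD code.toList 0 j
    rcases this with h | h
    · rw [PySem.List.pyGetD_natCast]
      simpa using h
    · omega
  rw [show ((0 : Nat) : Int) = ((0 : Int)) from rfl] at hB
  rw [hA, hB]
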